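-- pv_equiv track=rewrite | github.com/Ranxin2023/NLP_Demo | demo_code/NLPUtils/translation_demo.py | smt_translate
-- ===== SOURCE A (Python) =====
-- def smt_translate(text):
--     phrase_table = {
--         "machine translation": "机器翻译",
--         "is awesome": "非常棒",
--         "hello": "你好"
--     }
--
--     text = text.lower()
--     for phrase in sorted(phrase_table, key=len, reverse=True):
--         if phrase in text:
--             text = text.replace(phrase, phrase_table[phrase])
--     return text
-- ===== SOURCE B (Python) =====
-- def smt_translate(text):
--     table = [
--         ("machine translation", "机器翻译"),
--         ("is awesome", "非常棒"),
--         ("hello", "你好"),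
--     ]
--     s = text.lower()
--     out = []
--     i = 0
--     while i < len(s):
--         for phrase, trans in table:
--             if s.startswith(phrase, i):
--                 out.append(trans)
--                 i += len(phrase)
--                 break
--         else:
--             out.append(s[i])
--             i += 1
--     return "".join(out)
-- ===== Notes on version B (the rewrite author's own statement) =====
-- stated objective: alternative
-- what changed: Replaces A's three sequential full-string replace passes (one per phrase, longest-first) with a single left-to-right scan that at each position tries the phrases longest-first and emits either a translation or the current character.
import Mathlib
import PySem

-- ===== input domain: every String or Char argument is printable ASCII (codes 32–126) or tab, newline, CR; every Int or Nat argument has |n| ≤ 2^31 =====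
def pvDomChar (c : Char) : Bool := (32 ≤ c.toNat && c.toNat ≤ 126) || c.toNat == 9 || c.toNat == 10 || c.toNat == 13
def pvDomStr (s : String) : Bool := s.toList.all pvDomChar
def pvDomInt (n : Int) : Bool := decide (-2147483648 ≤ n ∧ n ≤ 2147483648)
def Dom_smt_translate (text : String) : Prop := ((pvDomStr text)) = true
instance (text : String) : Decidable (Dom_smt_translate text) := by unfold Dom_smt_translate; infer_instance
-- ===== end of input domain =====

set_option maxRecDepth 8000


-- B replaces A's three sequential full-string replace passes with a single left-to-right
-- scan that tries the phrases longest-first at each position (objective: alternative).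

-- ===== PORT A =====
def smt_translate (text : String) : String :=
  let phrase_table : PySem.Dict String String :=
    PySem.Dict.ofList
      [("machine translation", "机器翻译"), ("is awesome", "非常棒"), ("hello", "你好")]
  let text0 := PySem.Str.lower text
  (PySem.List.sorted phrase_table.keys (fun p => (PySem.Str.len p : Int)) true).foldl
    (fun t phrase =>
      if PySem.Str.isIn phrase t then
        PySem.Str.replace t phrase ((phrase_table.get? phrase).getD "")
      else t)
    text0

-- ===== PORT B =====
-- B's phrase table, longest phrase first
def pvTable : List (String × String) :=
  [("machine translation", "机器翻译"), ("is awesome", "非常棒"), ("hello", "你好")]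

-- B's while loop: at each position the first matching phrase (longest-first) is emitted
-- and skipped, otherwise the current character is copied
def pvScan (s : List Char) : List Char :=
  match s with
  | [] => []
  | c :: t =>
    match pvTable.find? (fun pr => pr.1.toList.isPrefixOf (c :: t)) with
    | some pr => pr.2.toList ++ pvScan (t.drop (pr.1.toList.length - 1))
    | none => c :: pvScan t
termination_by s.length
decreasing_by all_goals (simp only [List.length_drop, List.length_cons]; omega)

def smt_translate_alt (text : String) : String :=
  String.ofList (pvScan (PySem.Chars.lower text.toList))

-- ===== PRECONDITION & SPEC =====
def Spec_smt_translate (text : String) (out : String) : Prop := out = smt_translate_alt text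
instance (text : String) (out : String) : Decidable (Spec_smt_translate text out) := by unfold Spec_smt_translate; infer_instance

-- ===== CLAIM (what is proved, stated in full; the proofs are below) =====
def Claim_equal_smt_translate : Prop := ∀ (text : String), Dom_smt_translate text → Spec_smt_translate text (smt_translate text)

-- ===== LEMMAS AND PROOFS =====

-- proof-side model of Python's str.replace (old non-empty): leftmost non-overlapping scan
def pvRepl (old new : List Char) (s : List Char) : List Char :=
  match s with
  | [] => []
  | c :: t =>
    if old.isPrefixOf (c :: t) then new ++ pvRepl old new (t.drop (old.length - 1))
    else c :: pvRepl old new t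
termination_by s.length
decreasing_by all_goals (simp only [List.length_drop, List.length_cons]; omega)

def pvP1 : List Char := ['m','a','c','h','i','n','e',' ','t','r','a','n','s','l','a','t','i','o','n']
def pvT1 : List Char := ['机','器','翻','译']
def pvP2 : List Char := ['i','s',' ','a','w','e','s','o','m','e']
def pvT2 : List Char := ['非','常','棒']
def pvP3 : List Char := ['h','e','l','l','o']
def pvT3 : List Char := ['你','好']

lemma pvRepl_nil (old new : List Char) : pvRepl old new [] = [] := by
  simp [pvRepl]

lemma pvRepl_pos (old new rest : List Char) (h : old ≠ []) :
    pvRepl old new (old ++ rest) = new ++ pvRepl old new rest := by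
  obtain ⟨o, os, rfl⟩ := List.exists_cons_of_ne_nil h
  rw [List.cons_append, pvRepl]
  have hpre : (o :: os).isPrefixOf (o :: (os ++ rest)) = true := by
    rw [List.isPrefixOf_iff_prefix, ← List.cons_append]
    exact List.prefix_append _ _
  simp only [hpre, if_pos]
  congr 1
  congr 1
  simp

lemma pvRepl_neg (old new : List Char) (c : Char) (t : List Char)
    (h : ¬ old <+: (c :: t)) :
    pvRepl old new (c :: t) = c :: pvRepl old new t := by
  rw [pvRepl]
  simp only [List.isPrefixOf_iff_prefix]
  rw [if_neg h]

lemma pvRepl_skip (old new u : List Char)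
    (h : ∀ i < u.length, ¬ old <+: u.drop i ∧ ¬ u.drop i <+: old) :
    ∀ rest, pvRepl old new (u ++ rest) = u ++ pvRepl old new rest := by
  induction u with
  | nil => intro rest; simp
  | cons d u' ih =>
    intro rest
    have h0 := h 0 (by simp)
    simp only [List.drop_zero] at h0
    have hnp : ¬ old <+: d :: (u' ++ rest) := by
      intro hp
      rw [← List.cons_append] at hp
      rcases le_total old.length (d :: u').length with hle | hle
      · exact h0.1 (List.prefix_of_prefix_length_le hp (List.prefix_append _ _) hle)
      · exact h0.2 (List.prefix_of_prefix_length_le (List.prefix_append _ _) hp hle)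
    rw [List.cons_append, pvRepl_neg old new d (u' ++ rest) hnp]
    rw [ih (fun i hi => h (i + 1) (by simpa using Nat.succ_lt_succ hi)) rest]
    rfl

lemma pvRepl_pres (old : List Char) (nh : Char) (nt q : List Char)
    (hq : ∀ c ∈ q, c ≠ nh) :
    ∀ (cs : List Char) (i : Nat),
      ¬ q.drop i <+: cs → ¬ q.drop i <+: pvRepl old (nh :: nt) cs := by
  intro cs
  induction cs with
  | nil => intro i h; simpa [pvRepl_nil] using h
  | cons c t ih =>
    intro i h hcontra
    by_cases hpre : old.isPrefixOf (c :: t)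
    · rw [pvRepl, if_pos hpre] at hcontra
      rcases hdi : q.drop i with _ | ⟨e, es⟩
      · exact h (by simp [hdi])
      · rw [hdi, List.cons_append, List.cons_prefix_cons] at hcontra
        have he : e ∈ q := List.mem_of_mem_drop (by rw [hdi]; exact List.mem_cons_self ..)
        exact hq e he hcontra.1
    · rw [pvRepl, if_neg hpre] at hcontra
      have hi : i < q.length := by
        by_contra hge
        exact h (by simp [List.drop_eq_nil_of_le (Nat.le_of_not_lt hge)])
      rw [List.drop_eq_getElem_cons hi, List.cons_prefix_cons] at hcontra
      have hstep : ¬ q.drop (i + 1) <+: t := by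
        intro hp
        exact h (by rw [List.drop_eq_getElem_cons hi, List.cons_prefix_cons]
                    exact ⟨hcontra.1, hp⟩)
      exact ih (i + 1) hstep hcontra.2

lemma pvRepl_id (old new : List Char) :
    ∀ cs : List Char, ¬ old <:+: cs → pvRepl old new cs = cs := by
  intro cs
  induction cs with
  | nil => intro _; exact pvRepl_nil _ _
  | cons c t ih =>
    intro h
    rw [pvRepl_neg _ _ _ _ (fun hp => h hp.isInfix)]
    rw [ih (fun hi => h (hi.trans (List.suffix_cons c t).isInfix))]

lemma pvGo_eq (old new : List Char) (hne : old ≠ []) :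
    ∀ (fuel : Nat) (l acc : List Char), l.length ≤ fuel →
      PySem.Chars.replace.go old new fuel l acc = acc.reverse ++ pvRepl old new l := by
  intro fuel
  induction fuel with
  | zero =>
    intro l acc hl
    cases l with
    | nil => simp [PySem.Chars.replace.go, pvRepl_nil]
    | cons c t => simp at hl
  | succ fuel ih =>
    intro l acc hl
    cases l with
    | nil => simp [PySem.Chars.replace.go, pvRepl_nil]
    | cons c t =>
      rw [PySem.Chars.replace.go]
      by_cases hpre : old.isPrefixOf (c :: t)
      · simp only [hpre, if_pos]
        obtain ⟨o, os, rfl⟩ := List.exists_cons_of_ne_nil hne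
        have hlen : (List.drop (o :: os).length (c :: t)).length ≤ fuel := by
          simp only [List.length_drop, List.length_cons] at hl ⊢; omega
        rw [ih _ _ hlen]
        rw [pvRepl, if_pos hpre]
        simp
      · simp only [hpre, Bool.false_eq_true]
        have hlen : t.length ≤ fuel := by
          simp only [List.length_cons] at hl; omega
        rw [ih _ _ hlen]
        rw [pvRepl]
        simp only [hpre, Bool.false_eq_true]
        simp

lemma pvReplace_eq (old new s : List Char) (hne : old ≠ []) :
    PySem.Chars.replace s old new = pvRepl old new s := by
  rw [PySem.Chars.replace]
  simp only [List.isEmpty_eq_false_iff (l := old) |>.mpr hne]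
  simpa using pvGo_eq old new hne s.length s [] le_rfl

lemma pvStep_eq (t old new : String) (h : old.toList ≠ []) :
    (if PySem.Str.isIn old t then PySem.Str.replace t old new else t)
      = String.ofList (pvRepl old.toList new.toList t.toList) := by
  by_cases hin : PySem.Str.isIn old t
  · rw [if_pos hin]
    rw [show PySem.Str.replace t old new
          = String.ofList (PySem.Chars.replace t.toList old.toList new.toList) from rfl]
    rw [pvReplace_eq _ _ _ h]
  · rw [if_neg hin]
    have hninf : ¬ old.toList <:+: t.toList := by
      intro hi
      exact hin ((PySem.Str.isIn_iff_infix old t).mpr hi)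
    rw [pvRepl_id _ _ _ hninf, String.ofList_toList]

-- names for the translations as cons-literals (used when applying pvRepl_pres)
lemma pvT1_eq : pvT1 = ['机','器','翻','译'] := rfl
lemma pvT2_eq : pvT2 = ['非','常','棒'] := rfl

lemma pvScan_nil : pvScan [] = [] := by rw [pvScan.eq_def]

lemma pvFind_1 (c : Char) (t : List Char) (b1 : pvP1.isPrefixOf (c :: t) = true) :
    pvTable.find? (fun pr => pr.1.toList.isPrefixOf (c :: t))
      = some ("machine translation", "机器翻译") :=
  List.find?_cons_of_pos b1

lemma pvFind_2 (c : Char) (t : List Char) (nb1 : ¬ pvP1.isPrefixOf (c :: t) = true)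
    (b2 : pvP2.isPrefixOf (c :: t) = true) :
    pvTable.find? (fun pr => pr.1.toList.isPrefixOf (c :: t))
      = some ("is awesome", "非常棒") := by
  have h1 : pvTable.find? (fun pr => pr.1.toList.isPrefixOf (c :: t))
      = List.find? (fun pr => pr.1.toList.isPrefixOf (c :: t))
          [("is awesome", "非常棒"), ("hello", "你好")] :=
    List.find?_cons_of_neg nb1
  rw [h1]
  exact List.find?_cons_of_pos b2

lemma pvFind_3 (c : Char) (t : List Char) (nb1 : ¬ pvP1.isPrefixOf (c :: t) = true)
    (nb2 : ¬ pvP2.isPrefixOf (c :: t) = true) (b3 : pvP3.isPrefixOf (c :: t) = true) :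
    pvTable.find? (fun pr => pr.1.toList.isPrefixOf (c :: t))
      = some ("hello", "你好") := by
  have h1 : pvTable.find? (fun pr => pr.1.toList.isPrefixOf (c :: t))
      = List.find? (fun pr => pr.1.toList.isPrefixOf (c :: t))
          [("is awesome", "非常棒"), ("hello", "你好")] :=
    List.find?_cons_of_neg nb1
  rw [h1, List.find?_cons_of_neg (p := fun pr => pr.1.toList.isPrefixOf (c :: t))
        (a := ("is awesome", "非常棒")) nb2]
  exact List.find?_cons_of_pos b3

lemma pvFind_0 (c : Char) (t : List Char) (nb1 : ¬ pvP1.isPrefixOf (c :: t) = true)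
    (nb2 : ¬ pvP2.isPrefixOf (c :: t) = true) (nb3 : ¬ pvP3.isPrefixOf (c :: t) = true) :
    pvTable.find? (fun pr => pr.1.toList.isPrefixOf (c :: t)) = none := by
  have h1 : pvTable.find? (fun pr => pr.1.toList.isPrefixOf (c :: t))
      = List.find? (fun pr => pr.1.toList.isPrefixOf (c :: t))
          [("is awesome", "非常棒"), ("hello", "你好")] :=
    List.find?_cons_of_neg nb1
  rw [h1, List.find?_cons_of_neg (p := fun pr => pr.1.toList.isPrefixOf (c :: t))
        (a := ("is awesome", "非常棒")) nb2,
      List.find?_cons_of_neg (p := fun pr => pr.1.toList.isPrefixOf (c :: t))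
        (a := ("hello", "你好")) nb3]
  rfl

lemma pvScan_cons1 (c : Char) (t : List Char) (b1 : pvP1.isPrefixOf (c :: t) = true) :
    pvScan (c :: t) = pvT1 ++ pvScan (t.drop 18) := by
  rw [pvScan.eq_def]
  dsimp only
  rw [pvFind_1 c t b1]
  rfl

lemma pvScan_cons2 (c : Char) (t : List Char) (nb1 : ¬ pvP1.isPrefixOf (c :: t) = true)
    (b2 : pvP2.isPrefixOf (c :: t) = true) :
    pvScan (c :: t) = pvT2 ++ pvScan (t.drop 9) := by
  rw [pvScan.eq_def]
  dsimp only
  rw [pvFind_2 c t nb1 b2]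
  rfl

lemma pvScan_cons3 (c : Char) (t : List Char) (nb1 : ¬ pvP1.isPrefixOf (c :: t) = true)
    (nb2 : ¬ pvP2.isPrefixOf (c :: t) = true) (b3 : pvP3.isPrefixOf (c :: t) = true) :
    pvScan (c :: t) = pvT3 ++ pvScan (t.drop 4) := by
  rw [pvScan.eq_def]
  dsimp only
  rw [pvFind_3 c t nb1 nb2 b3]
  rfl

lemma pvScan_cons0 (c : Char) (t : List Char) (nb1 : ¬ pvP1.isPrefixOf (c :: t) = true)
    (nb2 : ¬ pvP2.isPrefixOf (c :: t) = true) (nb3 : ¬ pvP3.isPrefixOf (c :: t) = true) :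
    pvScan (c :: t) = c :: pvScan t := by
  rw [pvScan.eq_def]
  dsimp only
  rw [pvFind_0 c t nb1 nb2 nb3]

-- A as the composition of the three replace passes
lemma pvA_eq (text : String) :
    smt_translate text =
      String.ofList (pvRepl pvP3 pvT3 (pvRepl pvP2 pvT2
        (pvRepl pvP1 pvT1 (PySem.Chars.lower text.toList)))) := by
  show (PySem.List.sorted
        ((PySem.Dict.ofList
          [("machine translation", "机器翻译"), ("is awesome", "非常棒"), ("hello", "你好")]
            : PySem.Dict String String)).keys (fun p => (PySem.Str.len p : Int)) true).foldl
      (fun t phrase =>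
        if PySem.Str.isIn phrase t then
          PySem.Str.replace t phrase ((((PySem.Dict.ofList
          [("machine translation", "机器翻译"), ("is awesome", "非常棒"), ("hello", "你好")]
            : PySem.Dict String String)).get? phrase).getD "")
        else t)
      (PySem.Str.lower text) = _
  rw [show PySem.List.sorted
        ((PySem.Dict.ofList
          [("machine translation", "机器翻译"), ("is awesome", "非常棒"), ("hello", "你好")]
            : PySem.Dict String String)).keys (fun p => (PySem.Str.len p : Int)) true
      = ["machine translation", "is awesome", "hello"] from by decide]
  simp only [List.foldl]
  rw [pvStep_eq (PySem.Str.lower text) "machine translation" _ (by decide)]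
  rw [pvStep_eq _ "is awesome" _ (by decide)]
  rw [pvStep_eq _ "hello" _ (by decide)]
  rw [show (((PySem.Dict.ofList
          [("machine translation", "机器翻译"), ("is awesome", "非常棒"), ("hello", "你好")]
            : PySem.Dict String String)).get? "machine translation").getD "" = "机器翻译" from by decide]
  rw [show (((PySem.Dict.ofList
          [("machine translation", "机器翻译"), ("is awesome", "非常棒"), ("hello", "你好")]
            : PySem.Dict String String)).get? "is awesome").getD "" = "非常棒" from by decide]
  rw [show (((PySem.Dict.ofList
          [("machine translation", "机器翻译"), ("is awesome", "非常棒"), ("hello", "你好")]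
            : PySem.Dict String String)).get? "hello").getD "" = "你好" from by decide]
  simp only [String.toList_ofList, PySem.Str.toList_lower]
  rw [show ("machine translation".toList) = pvP1 from rfl,
      show ("is awesome".toList) = pvP2 from rfl,
      show ("hello".toList) = pvP3 from rfl,
      show ("机器翻译".toList) = pvT1 from rfl,
      show ("非常棒".toList) = pvT2 from rfl,
      show ("你好".toList) = pvT3 from rfl]

-- single scan = composition of the three passes
lemma pvMain : ∀ (n : Nat) (cs : List Char), cs.length ≤ n →
    pvRepl pvP3 pvT3 (pvRepl pvP2 pvT2 (pvRepl pvP1 pvT1 cs)) = pvScan cs := by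
  intro n
  induction n with
  | zero =>
    intro cs hl
    cases cs with
    | nil => simp [pvRepl_nil, pvScan_nil]
    | cons c t => simp at hl
  | succ n ih =>
    intro cs hl
    cases cs with
    | nil => simp [pvRepl_nil, pvScan_nil]
    | cons c t =>
      by_cases b1 : pvP1.isPrefixOf (c :: t)
      · obtain ⟨rest, hrest⟩ := List.isPrefixOf_iff_prefix.mp b1
        have hlen : rest.length ≤ n := by
          have hle := congrArg List.length hrest
          simp only [List.length_append, List.length_cons] at hle
          simp only [List.length_cons] at hl
          have h19 : pvP1.length = 19 := by decide
          omega
        have hdrop : List.drop 18 t = rest := by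
          have h := congrArg (List.drop 19) hrest
          rw [List.drop_left' (by decide : pvP1.length = 19)] at h
          exact h.symm
        rw [← hrest, pvRepl_pos pvP1 pvT1 rest (by decide)]
        rw [pvRepl_skip pvP2 pvT2 pvT1 (by decide) _]
        rw [pvRepl_skip pvP3 pvT3 pvT1 (by decide) _]
        rw [hrest, pvScan_cons1 c t b1, hdrop, ih rest hlen]
      · by_cases b2 : pvP2.isPrefixOf (c :: t)
        · obtain ⟨rest, hrest⟩ := List.isPrefixOf_iff_prefix.mp b2
          have hlen : rest.length ≤ n := by
            have hle := congrArg List.length hrest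
            simp only [List.length_append, List.length_cons] at hle
            simp only [List.length_cons] at hl
            have h10 : pvP2.length = 10 := by decide
            omega
          have hdrop : List.drop 9 t = rest := by
            have h := congrArg (List.drop 10) hrest
            rw [List.drop_left' (by decide : pvP2.length = 10)] at h
            exact h.symm
          rw [← hrest, pvRepl_skip pvP1 pvT1 pvP2 (by decide) _]
          rw [pvRepl_pos pvP2 pvT2 _ (by decide)]
          rw [pvRepl_skip pvP3 pvT3 pvT2 (by decide) _]
          rw [hrest, pvScan_cons2 c t b1 b2, hdrop, ih rest hlen]
        · by_cases b3 : pvP3.isPrefixOf (c :: t)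
          · obtain ⟨rest, hrest⟩ := List.isPrefixOf_iff_prefix.mp b3
            have hlen : rest.length ≤ n := by
              have hle := congrArg List.length hrest
              simp only [List.length_append, List.length_cons] at hle
              simp only [List.length_cons] at hl
              have h5 : pvP3.length = 5 := by decide
              omega
            have hdrop : List.drop 4 t = rest := by
              have h := congrArg (List.drop 5) hrest
              rw [List.drop_left' (by decide : pvP3.length = 5)] at h
              exact h.symm
            rw [← hrest, pvRepl_skip pvP1 pvT1 pvP3 (by decide) _]
            rw [pvRepl_skip pvP2 pvT2 pvP3 (by decide) _]
            rw [pvRepl_pos pvP3 pvT3 _ (by decide)]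
            rw [hrest, pvScan_cons3 c t b1 b2 b3, hdrop, ih rest hlen]
          · have hp1 : ¬ pvP1 <+: (c :: t) := fun h => b1 (List.isPrefixOf_iff_prefix.mpr h)
            have hp2 : ¬ pvP2 <+: (c :: t) := fun h => b2 (List.isPrefixOf_iff_prefix.mpr h)
            have hp3 : ¬ pvP3 <+: (c :: t) := fun h => b3 (List.isPrefixOf_iff_prefix.mpr h)
            have e1 : pvRepl pvP1 pvT1 (c :: t) = c :: pvRepl pvP1 pvT1 t :=
              pvRepl_neg _ _ _ _ hp1
            have k2 : ¬ pvP2 <+: pvRepl pvP1 pvT1 (c :: t) := by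
              rw [pvT1_eq]
              simpa using pvRepl_pres pvP1 '机' ['器','翻','译'] pvP2 (by simp [pvP2]) (c :: t) 0
                (by simpa using hp2)
            have e2 : pvRepl pvP2 pvT2 (pvRepl pvP1 pvT1 (c :: t))
                = c :: pvRepl pvP2 pvT2 (pvRepl pvP1 pvT1 t) := by
              rw [e1] at k2 ⊢
              exact pvRepl_neg _ _ _ _ k2
            have k3 : ¬ pvP3 <+: pvRepl pvP2 pvT2 (pvRepl pvP1 pvT1 (c :: t)) := by
              have s1 : ¬ pvP3 <+: pvRepl pvP1 pvT1 (c :: t) := by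
                rw [pvT1_eq]
                simpa using pvRepl_pres pvP1 '机' ['器','翻','译'] pvP3 (by simp [pvP3]) (c :: t) 0
                  (by simpa using hp3)
              rw [pvT2_eq]
              simpa using pvRepl_pres pvP2 '非' ['常','棒'] pvP3 (by simp [pvP3])
                (pvRepl pvP1 pvT1 (c :: t)) 0 (by simpa using s1)
            have e3 : pvRepl pvP3 pvT3 (pvRepl pvP2 pvT2 (pvRepl pvP1 pvT1 (c :: t)))
                = c :: pvRepl pvP3 pvT3 (pvRepl pvP2 pvT2 (pvRepl pvP1 pvT1 t)) := by
              rw [e2] at k3 ⊢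
              exact pvRepl_neg _ _ _ _ k3
            have hlen : t.length ≤ n := by
              simp only [List.length_cons] at hl
              omega
            rw [e3, pvScan_cons0 c t b1 b2 b3, ih t hlen]

-- ===== VERDICT (by name: the statement is the Claim_ definition above) =====
theorem smt_translate_spec : Claim_equal_smt_translate := by
  intro text _
  unfold Spec_smt_translate
  rw [pvA_eq, pvMain (PySem.Chars.lower text.toList).length _ le_rfl]
  rfl
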